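-- pv_equiv track=rewrite | github.com/sainallamilli/autorename | plugins/file_rename.py | is_valid_filename
-- ===== SOURCE A (Python) =====
-- def is_valid_filename(filename):
--     """Check if filename is valid and has extension"""
--     if not filename or filename.strip() == "":
--         return False
--
--     # Check for invalid characters
--     invalid_chars = ['/', '\\', ':', '*', '?', '"', '<', '>', '|']
--     if any(char in filename for char in invalid_chars):
--         return False
--
--     # Check if it has an extension (at least one dot with something after it)
--     if '.' not in filename or filename.endswith('.'):
--         return False
--
--     return True
-- ===== SOURCE B (Python) =====
-- _INVALID = frozenset('/\\:*?"<>|')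
--
-- def is_valid_filename(filename):
--     """Check if filename is valid and has extension"""
--     if not filename or filename.strip() == "":
--         return False
--     has_invalid = False
--     has_dot = False
--     for ch in filename:
--         if ch in _INVALID:
--             has_invalid = True
--         if ch == '.':
--             has_dot = True
--     if has_invalid or not has_dot or filename[-1] == '.':
--         return False
--     return True
-- ===== Notes on version B (the rewrite author's own statement) =====
-- stated objective: alternative
-- what changed: Replaces A's ten separate substring scans (nine invalid-char 'in' tests plus the dot test and endswith) with one single pass over the characters maintaining has_invalid/has_dot flags, followed by a last-character check.
import Mathlib
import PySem

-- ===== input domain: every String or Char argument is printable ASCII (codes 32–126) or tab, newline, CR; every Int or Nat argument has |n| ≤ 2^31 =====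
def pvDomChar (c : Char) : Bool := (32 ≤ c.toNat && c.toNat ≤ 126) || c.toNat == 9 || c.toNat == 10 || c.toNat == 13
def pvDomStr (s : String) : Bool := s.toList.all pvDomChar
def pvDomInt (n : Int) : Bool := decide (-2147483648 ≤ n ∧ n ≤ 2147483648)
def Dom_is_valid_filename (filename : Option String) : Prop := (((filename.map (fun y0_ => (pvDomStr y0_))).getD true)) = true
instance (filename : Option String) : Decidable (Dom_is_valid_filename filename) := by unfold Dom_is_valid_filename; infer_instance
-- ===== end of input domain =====

-- B replaces A's ten separate substring scans with one fold over the characters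
-- maintaining has_invalid/has_dot flags plus a last-character check (objective: alternative).


-- ===== PORT A =====
def is_valid_filename (filename : Option String) : Bool :=
  match filename with
  | none => false
  | some s =>
    if s = "" || PySem.Str.strip s = "" then false
    else if (['/', '\\', ':', '*', '?', '"', '<', '>', '|'].any
              (fun c => PySem.Str.isIn (String.singleton c) s)) then false
    else if !(PySem.Str.isIn "." s) || PySem.Str.endswith s "." then false
    else true

-- ===== PORT B =====
def pvInvalidChars : List Char := ['/', '\\', ':', '*', '?', '"', '<', '>', '|']

def is_valid_filename_alt (filename : Option String) : Bool :=
  match filename with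
  | none => false
  | some s =>
    if s = "" || PySem.Str.strip s = "" then false
    else
      let st := s.toList.foldl
        (fun (p : Bool × Bool) ch =>
          (p.1 || pvInvalidChars.contains ch, p.2 || ch == '.'))
        (false, false)
      if st.1 || !st.2 || (PySem.Str.pyGet? s (-1) == some '.') then false
      else true

-- ===== PRECONDITION & SPEC =====
def Spec_is_valid_filename (filename : Option String) (out : Bool) : Prop := out = is_valid_filename_alt filename
instance (filename : Option String) (out : Bool) : Decidable (Spec_is_valid_filename filename out) := by unfold Spec_is_valid_filename; infer_instance

-- ===== CLAIM (what is proved, stated in full; the proofs are below) =====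
def Claim_equal_is_valid_filename : Prop := ∀ (filename : Option String), Dom_is_valid_filename filename → Spec_is_valid_filename filename (is_valid_filename filename)

-- ===== LEMMAS AND PROOFS =====

-- the fold accumulates "some invalid char occurs" and "a dot occurs"
theorem pv_fold_flags (l : List Char) (a b : Bool) :
    l.foldl (fun (p : Bool × Bool) ch =>
        (p.1 || pvInvalidChars.contains ch, p.2 || ch == '.')) (a, b)
    = (a || l.any (fun ch => pvInvalidChars.contains ch), b || l.any (fun ch => ch == '.')) := by
  induction l generalizing a b with
  | nil => simp
  | cons x xs ih =>
    simp only [List.foldl_cons, List.any_cons]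
    rw [ih]
    simp [Bool.or_assoc]

-- single-character substring test is membership
theorem pv_isIn_singleton (c : Char) (s : String) :
    PySem.Str.isIn (String.singleton c) s = s.toList.contains c := by
  rw [Bool.eq_iff_iff, PySem.Str.isIn_iff_infix]
  have hs : (String.singleton c).toList = [c] := by simp
  rw [hs]
  simp only [List.contains_eq_mem, decide_eq_true_eq]
  constructor
  · intro hinf
    exact List.singleton_sublist.mp hinf.sublist
  · intro hm
    rcases List.append_of_mem hm with ⟨l1, l2, hsplit⟩
    rw [hsplit]
    exact ⟨l1, l2, by simp⟩

-- trailing-dot test equals last-character test, for a nonempty list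
theorem pv_endswith_dot_chars (l : List Char) (h : l ≠ []) :
    PySem.Chars.endswith l ['.'] = (PySem.List.pyGet? l (-1) == some '.') := by
  rw [PySem.List.pyGet?_neg_one, Bool.eq_iff_iff, PySem.Chars.endswith_iff]
  rcases hl : l.getLast? with _ | c
  · rw [List.getLast?_eq_none_iff] at hl; exact absurd hl h
  · rw [List.getLast?_eq_some_iff] at hl
    obtain ⟨ys, rfl⟩ := hl
    constructor
    · rintro ⟨zs, hz⟩
      have hc : '.' = c := by
        have := congrArg List.getLast? hz
        simpa using this
      cases hc
      simp
    · intro hc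
      have hc' : c = '.' := by simpa [List.getLast?_append] using hc
      exact ⟨ys, by rw [hc']⟩

theorem pv_endswith_dot (s : String) (h : s.toList ≠ []) :
    PySem.Str.endswith s "." = (PySem.Str.pyGet? s (-1) == some '.') := by
  simpa using pv_endswith_dot_chars s.toList h

-- ===== VERDICT =====
theorem is_valid_filename_spec : Claim_equal_is_valid_filename := by
  intro filename _
  unfold Spec_is_valid_filename is_valid_filename is_valid_filename_alt
  match filename with
  | none => rfl
  | some s =>
    by_cases hempty : s = "" || PySem.Str.strip s = ""
    · simp [hempty]
    · simp only [hempty]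
      have hne : s.toList ≠ [] := by
        intro h
        have : s = "" := by simpa using h
        simp [this] at hempty
      rw [pv_fold_flags]
      simp only [Bool.false_or]
      rw [← pv_endswith_dot s hne]
      have hinv : (['/', '\\', ':', '*', '?', '"', '<', '>', '|'].any
              (fun c => PySem.Str.isIn (String.singleton c) s))
          = s.toList.any (fun ch => pvInvalidChars.contains ch) := by
        simp only [pv_isIn_singleton]
        rw [Bool.eq_iff_iff]
        simp only [List.any_eq_true, List.contains_eq_mem, decide_eq_true_eq, pvInvalidChars]
        constructor
        · rintro ⟨c, hc, hm⟩; exact ⟨c, hm, hc⟩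
        · rintro ⟨c, hm, hc⟩; exact ⟨c, hc, hm⟩
      have hdot : PySem.Str.isIn "." s = s.toList.any (fun ch => ch == '.') := by
        have h1 : PySem.Str.isIn "." s = s.toList.contains '.' := by
          simpa using pv_isIn_singleton '.' s
        rw [h1, Bool.eq_iff_iff]
        simp
      rw [hinv, hdot]
      rcases ha : s.toList.any (fun ch => pvInvalidChars.contains ch) with _ | _ <;>
        rcases hd : s.toList.any (fun ch => ch == '.') with _ | _ <;>
        rcases he : PySem.Str.endswith s "." with _ | _ <;> simp
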